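-- pv_equiv track=rewrite | github.com/anoubhav/30-Day-SDE-Challenge | Day_9/5_permutations_of_arr_no_dups.py | permuteDFS
-- ===== SOURCE A (Python) =====
-- def permuteDFS(nums):
--
--     def dfs(nums, path, res):
--         if not nums:
--             res.append(path)
--         for i in range(len(nums)):
--             dfs(nums[:i] + nums[i+1:], path + [nums[i]], res)
--             # add nums[i] to path
--
--     res = []
--     dfs(nums, [], res)
--     return res
-- ===== SOURCE B (Python) =====
-- def permuteDFS(nums):
--     # Iterative level-by-level extension instead of recursion: each state is
--     # (path so far, remaining elements); one pass per output position.
--     states = [([], nums)]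
--     for _ in range(len(nums)):
--         states = [(path + [rem[i]], rem[:i] + rem[i + 1:])
--                   for (path, rem) in states
--                   for i in range(len(rem))]
--     return [path for (path, _) in states]
-- ===== Notes on version B (the rewrite author's own statement) =====
-- stated objective: alternative
-- what changed: Replaces the recursive remove-and-recurse DFS with a mutable result list by an iterative level-by-level extension: a list of (path, remaining) states is rebuilt once per output position, yielding the same index-selection order.
import Mathlib
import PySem

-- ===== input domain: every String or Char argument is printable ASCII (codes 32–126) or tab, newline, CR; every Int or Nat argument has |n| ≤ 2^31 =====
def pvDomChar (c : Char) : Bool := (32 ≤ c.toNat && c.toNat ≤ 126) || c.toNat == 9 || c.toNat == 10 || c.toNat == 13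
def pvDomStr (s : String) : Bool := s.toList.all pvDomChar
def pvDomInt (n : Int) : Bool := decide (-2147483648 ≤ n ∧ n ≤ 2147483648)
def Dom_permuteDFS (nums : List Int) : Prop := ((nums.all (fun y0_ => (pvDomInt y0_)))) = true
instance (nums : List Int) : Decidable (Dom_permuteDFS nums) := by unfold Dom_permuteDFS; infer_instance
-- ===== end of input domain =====

-- B replaces A's recursive DFS (mutable result list) by an iterative level-by-level
-- extension of (path, remaining) states; same return value, same order (alternative).

-- termination measure for the DFS: removing index i shortens the list
theorem pvRemoveLen_lt {α : Type} (xs : List α) (i : Nat) (h : i < xs.length) :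
    (xs.take i ++ xs.drop (i + 1)).length < xs.length := by
  simp [List.length_take, List.length_drop]; omega

-- ===== PORT A =====
-- helper dfs(nums, path, res); 'res.append' threaded as an accumulator.
-- nums[:i] ++ nums[i+1:] ported as take/drop and nums[i] as getD (exact: i is a
-- Nat from range(len(nums))).
def pvDfsA (nums path : List Int) (res : List (List Int)) : List (List Int) :=
  let res1 := if nums = [] then res ++ [path] else res
  List.foldl
    (fun acc i =>
      if h : i < nums.length then
        pvDfsA (nums.take i ++ nums.drop (i + 1)) (path ++ [nums.getD i 0]) acc
      else acc)
    res1 (List.range nums.length)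
termination_by nums.length
decreasing_by exact pvRemoveLen_lt nums i h

def permuteDFS (nums : List Int) : List (List Int) :=
  pvDfsA nums [] []

-- ===== PORT B =====
-- one extension step: every state (path, rem) is replaced by the states obtained
-- by moving each remaining element (by index) onto the path.
def pvStepB (states : List (List Int × List Int)) : List (List Int × List Int) :=
  states.flatMap (fun s =>
    (List.range s.2.length).map (fun i =>
      (s.1 ++ [s.2.getD i 0], s.2.take i ++ s.2.drop (i + 1))))

def permuteDFS_alt (nums : List Int) : List (List Int) :=
  (List.foldl (fun st _ => pvStepB st) [(([] : List Int), nums)]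
    (List.range nums.length)).map Prod.fst

-- ===== PRECONDITION & SPEC =====
def Spec_permuteDFS (nums : List Int) (out : List (List Int)) : Prop := out = permuteDFS_alt nums
instance (nums : List Int) (out : List (List Int)) : Decidable (Spec_permuteDFS nums out) := by unfold Spec_permuteDFS; infer_instance

-- ===== CLAIM (what is proved, stated in full; the proofs are below) =====
def Claim_equal_permuteDFS : Prop := ∀ (nums : List Int), Dom_permuteDFS nums → Spec_permuteDFS nums (permuteDFS nums)

-- ===== LEMMAS AND PROOFS =====

-- the B fold over range n is n iterations of pvStepB
theorem pvFold_eq_iterate (n : Nat) (st : List (List Int × List Int)) :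
    List.foldl (fun st _ => pvStepB st) st (List.range n) = pvStepB^[n] st := by
  induction n generalizing st with
  | zero => simp
  | succ k ih =>
      rw [List.range_succ, List.foldl_append]
      simp [ih, Function.iterate_succ_apply']

theorem pvStepB_append (l1 l2 : List (List Int × List Int)) :
    pvStepB (l1 ++ l2) = pvStepB l1 ++ pvStepB l2 := by
  simp [pvStepB]

theorem pvIter_append (n : Nat) (l1 l2 : List (List Int × List Int)) :
    pvStepB^[n] (l1 ++ l2) = pvStepB^[n] l1 ++ pvStepB^[n] l2 := by
  induction n generalizing l1 l2 with
  | zero => simp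
  | succ k ih => simp only [Function.iterate_succ_apply, pvStepB_append, ih]

theorem pvIter_flatMap (n : Nat) (l : List (List Int × List Int)) :
    pvStepB^[n] l = l.flatMap (fun s => pvStepB^[n] [s]) := by
  induction l with
  | nil =>
      have : pvStepB^[n] ([] : List (List Int × List Int)) = [] := by
        induction n with
        | zero => rfl
        | succ k ih => rw [Function.iterate_succ_apply, show pvStepB [] = [] from rfl, ih]
      simp [this]
  | cons s t ih =>
      have : (s :: t) = [s] ++ t := rfl
      rw [this, pvIter_append, ih]
      simp

-- generic loop-shape lemma: a fold whose body appends a per-element block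
theorem pvFoldlAppendFlatMap {α β : Type}
    {f : List β → α → List β} {g : α → List β} {l : List α} {res : List β}
    (h : ∀ (acc : List β) (x : α), x ∈ l → f acc x = acc ++ g x) :
    List.foldl f res l = res ++ l.flatMap g := by
  induction l generalizing res with
  | nil => simp
  | cons x t ih =>
      rw [List.foldl_cons, h res x (List.mem_cons_self ..), List.flatMap_cons, ← List.append_assoc]
      exact ih (fun acc y hy => h acc y (List.mem_cons_of_mem _ hy))

-- core invariant: A's dfs appends to res exactly the paths of |nums| extension steps
theorem pvDfsA_eq (n : Nat) : ∀ (nums path : List Int) (res : List (List Int)),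
    nums.length = n →
    pvDfsA nums path res = res ++ (pvStepB^[n] [(path, nums)]).map Prod.fst := by
  induction n with
  | zero =>
      intro nums path res h
      have hn : nums = [] := List.eq_nil_of_length_eq_zero h
      subst hn
      simp [pvDfsA]
  | succ k ih =>
      intro nums path res h
      have hne : nums ≠ [] := by intro hc; subst hc; simp at h
      rw [Function.iterate_succ_apply]
      have hstep : pvStepB [(path, nums)] =
          (List.range nums.length).map (fun i =>
            (path ++ [nums.getD i 0], nums.take i ++ nums.drop (i + 1))) := by
        simp [pvStepB]
      rw [hstep, pvIter_flatMap]
      rw [List.flatMap_map, List.map_flatMap]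
      rw [pvDfsA]
      simp only [if_neg hne]
      rw [pvFoldlAppendFlatMap (g := fun i =>
        (pvStepB^[k] [(path ++ [nums.getD i 0], nums.take i ++ nums.drop (i + 1))]).map Prod.fst)]
      intro acc i hi
      have hlt : i < nums.length := List.mem_range.mp hi
      rw [dif_pos hlt]
      apply ih
      simp [List.length_take, List.length_drop]
      omega

-- ===== VERDICT (by name: the statement is the Claim_ definition above) =====
theorem permuteDFS_spec : Claim_equal_permuteDFS := by
  intro nums _
  unfold Spec_permuteDFS permuteDFS permuteDFS_alt
  rw [pvFold_eq_iterate, pvDfsA_eq nums.length nums [] [] rfl, List.nil_append]
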